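-- pv_equiv track=rewrite | github.com/grubufabc/grubot | cf2.py | getProblemInfo
-- ===== SOURCE A (Python) =====
-- def getProblemInfo(link):
-- 	probId = ""
-- 	contId = 0
--
-- 	for c in link:
-- 		if c >= '0' and c <= '9':
-- 			contId *= 10
-- 			contId += int(c)
-- 		elif c >= 'A' and c <= 'Z':
-- 			probId = c
--
-- 	return contId, probId
-- ===== SOURCE B (Python) =====
-- def getProblemInfo(link):
--     probId = next((c for c in reversed(link) if 'A' <= c <= 'Z'), "")
--     contId = 0
--     place = 1
--     for c in reversed(link):
--         if '0' <= c <= '9':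
--             contId += (ord(c) - 48) * place
--             place *= 10
--     return contId, probId
-- ===== Notes on version B (the rewrite author's own statement) =====
-- stated objective: alternative
-- what changed: B traverses the string back-to-front: the last uppercase letter is found by a reversed search that stops at the first hit, and the contest id is rebuilt from the reversed digits by place-value accumulation (digit*place, place*=10) instead of A's forward multiply-add horner loop.
import Mathlib
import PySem

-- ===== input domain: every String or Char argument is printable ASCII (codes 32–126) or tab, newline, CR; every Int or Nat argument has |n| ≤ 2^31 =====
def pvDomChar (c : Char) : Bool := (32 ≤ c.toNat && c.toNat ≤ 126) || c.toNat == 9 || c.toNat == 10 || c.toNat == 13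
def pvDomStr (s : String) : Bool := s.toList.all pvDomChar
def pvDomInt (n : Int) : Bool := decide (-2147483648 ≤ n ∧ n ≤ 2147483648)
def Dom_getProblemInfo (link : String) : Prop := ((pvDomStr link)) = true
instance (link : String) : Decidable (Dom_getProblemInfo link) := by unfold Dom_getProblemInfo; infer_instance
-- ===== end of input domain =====

-- B rebuilds both results back-to-front (reversed search for the letter, place-value accumulation
-- for the digits) instead of A's single forward multiply-add loop; alternative, same cost.

-- ===== PORT A =====
-- the loop body of A (probId, contId are the state, in that order);
-- int(c) on this branch has '0' <= c <= '9', where int(c) is exactly ord(c) - 48 (ported by hand)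
def aStep (st : String × Int) (c : Char) : String × Int :=
  if '0' ≤ c ∧ c ≤ '9' then (st.1, st.2 * 10 + ((c.toNat : Int) - 48))
  else if 'A' ≤ c ∧ c ≤ 'Z' then (String.mk [c], st.2)
  else st

def getProblemInfo (link : String) : Int × String :=
  let st := link.toList.foldl aStep ("", 0)
  (st.2, st.1)

-- ===== PORT B =====
-- the loop body of B's place-value loop (contId, place are the state)
def bStep (st : Int × Int) (c : Char) : Int × Int :=
  if '0' ≤ c ∧ c ≤ '9' then (st.1 + ((c.toNat : Int) - 48) * st.2, st.2 * 10)
  else st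

def getProblemInfo_alt (link : String) : Int × String :=
  -- next((c for c in reversed(link) if 'A' <= c <= 'Z'), "")
  let probId := match link.toList.reverse.find? (fun c => decide ('A' ≤ c) && decide (c ≤ 'Z')) with
    | some c => String.mk [c]
    | none => ""
  let st := link.toList.reverse.foldl bStep (0, 1)
  (st.1, probId)

-- ===== PRECONDITION & SPEC =====
def Spec_getProblemInfo (link : String) (out : Int × String) : Prop := out = getProblemInfo_alt link
instance (link : String) (out : Int × String) : Decidable (Spec_getProblemInfo link out) := by unfold Spec_getProblemInfo; infer_instance

-- ===== CLAIM (what is proved, stated in full; the proofs are below) =====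
def Claim_equal_getProblemInfo : Prop := ∀ (link : String), Dom_getProblemInfo link → Spec_getProblemInfo link (getProblemInfo link)

-- ===== LEMMAS AND PROOFS =====

-- the digit values of l, in order
def pvDigs (l : List Char) : List Int :=
  (l.filter (fun c => decide ('0' ≤ c ∧ c ≤ '9'))).map (fun c => (c.toNat : Int) - 48)

-- horner value
def pvH (ds : List Int) (n : Int) : Int := ds.foldl (fun a d => a * 10 + d) n

theorem pvH_shift (ds : List Int) (n : Int) : pvH ds n = n * 10 ^ ds.length + pvH ds 0 := by
  induction ds generalizing n with
  | nil => simp [pvH]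
  | cons d ds ih =>
    simp only [pvH, List.foldl_cons, List.length_cons]
    rw [show (ds.foldl (fun a d => a * 10 + d) (n * 10 + d)) = pvH ds (n * 10 + d) from rfl,
        show (ds.foldl (fun a d => a * 10 + d) (0 * 10 + d)) = pvH ds (0 * 10 + d) from rfl,
        ih (n * 10 + d), ih (0 * 10 + d)]
    ring

theorem pvA_snd (l : List Char) (p : String) (n : Int) :
    (l.foldl aStep (p, n)).2 = pvH (pvDigs l) n := by
  induction l generalizing p n with
  | nil => simp [pvH, pvDigs]
  | cons c l ih =>
    by_cases h : '0' ≤ c ∧ c ≤ '9'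
    · simp only [List.foldl_cons, aStep, if_pos h]
      rw [ih]
      simp [pvDigs, pvH, h]
    · by_cases h2 : 'A' ≤ c ∧ c ≤ 'Z' <;>
        simp only [List.foldl_cons, aStep, if_neg h, h2] <;>
        rw [ih] <;> simp [pvDigs, h]

theorem pvA_fst (l : List Char) (p : String) (n : Int) :
    (l.foldl aStep (p, n)).1 =
      match l.reverse.find? (fun c => decide ('A' ≤ c) && decide (c ≤ 'Z')) with
      | some c => String.mk [c]
      | none => p := by
  induction l generalizing p n with
  | nil => simp
  | cons c l ih =>
    have hrev : (c :: l).reverse = l.reverse ++ [c] := by simp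
    rw [List.foldl_cons, hrev, List.find?_append]
    by_cases h : '0' ≤ c ∧ c ≤ '9'
    · have hup : ¬ ('A' ≤ c ∧ c ≤ 'Z') := by
        rintro ⟨h1, _⟩
        exact absurd (le_trans h1 h.2) (by decide)
      simp only [aStep, if_pos h, ih]
      cases l.reverse.find? (fun c => decide ('A' ≤ c) && decide (c ≤ 'Z')) with
      | some u => simp
      | none =>
        have hb : (decide ('A' ≤ c) && decide (c ≤ 'Z')) = false := by
          simp only [Bool.and_eq_false_iff, decide_eq_false_iff_not]; tauto
        simp [hb]
    · by_cases h2 : 'A' ≤ c ∧ c ≤ 'Z'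
      · simp only [aStep, if_neg h, if_pos h2, ih]
        cases l.reverse.find? (fun c => decide ('A' ≤ c) && decide (c ≤ 'Z')) with
        | some u => simp
        | none => simp [h2]
      · simp only [aStep, if_neg h, if_neg h2, ih]
        cases l.reverse.find? (fun c => decide ('A' ≤ c) && decide (c ≤ 'Z')) with
        | some u => simp
        | none =>
          have hb : (decide ('A' ≤ c) && decide (c ≤ 'Z')) = false := by
            simp only [Bool.and_eq_false_iff, decide_eq_false_iff_not]; tauto
          simp [hb]

theorem pvB_fold (l : List Char) :
    l.reverse.foldl bStep (0, 1) = (pvH (pvDigs l) 0, 10 ^ (pvDigs l).length) := by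
  rw [List.foldl_reverse]
  induction l with
  | nil => simp [pvH, pvDigs]
  | cons c l ih =>
    rw [List.foldr_cons, ih]
    by_cases h : '0' ≤ c ∧ c ≤ '9'
    · simp only [bStep, if_pos h]
      have hd : pvDigs (c :: l) = ((c.toNat : Int) - 48) :: pvDigs l := by
        simp [pvDigs, h]
      rw [hd]
      have : pvH (((c.toNat : Int) - 48) :: pvDigs l) 0 =
          ((c.toNat : Int) - 48) * 10 ^ (pvDigs l).length + pvH (pvDigs l) 0 := by
        show pvH (pvDigs l) (0 * 10 + ((c.toNat : Int) - 48)) = _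
        rw [pvH_shift]
        ring
      rw [this]
      simp [pow_succ]
      ring_nf
    · simp only [bStep, if_neg h]
      have hd : pvDigs (c :: l) = pvDigs l := by simp [pvDigs, h]
      rw [hd]

-- ===== VERDICT (by name: the statement is the Claim_ definition above) =====
theorem getProblemInfo_spec : Claim_equal_getProblemInfo := by
  intro link _
  show getProblemInfo link = getProblemInfo_alt link
  unfold getProblemInfo getProblemInfo_alt
  rw [pvB_fold]
  refine Prod.ext ?_ ?_
  · exact pvA_snd link.toList "" 0
  · exact pvA_fst link.toList "" 0
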